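-- pv_equiv track=rewrite | github.com/MartinSchmauch/Experience-Breeding-for-Resource-Allocation-in-PAIS | src/process/transition_weights.py | has_excessive_loops
-- ===== SOURCE A (Python) =====
-- from typing import Dict, List, Tuple, Set, Optional, Any
-- from collections import Counter
--
-- def has_excessive_loops(
--     activities: List[str],
--     max_activity_occurrences: Optional[int]
-- ) -> bool:
--     """Return whether a trace exceeds the allowed number of visits per activity."""
--     if max_activity_occurrences is None:
--         return False
--
--     if max_activity_occurrences < 1:
--         raise ValueError("max_activity_occurrences must be at least 1")
--
--     counts = Counter(activities)
--     return any(count > max_activity_occurrences for count in counts.values())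
-- ===== SOURCE B (Python) =====
-- def has_excessive_loops(activities, max_activity_occurrences):
--     """Sort the trace, then scan for a run of equal adjacent activities longer
--     than the threshold (no counting table at all)."""
--     if max_activity_occurrences is None:
--         return False
--     if max_activity_occurrences < 1:
--         raise ValueError("max_activity_occurrences must be at least 1")
--     prev = None
--     run = 0
--     for a in sorted(activities):
--         run = run + 1 if a == prev else 1
--         prev = a
--         if run > max_activity_occurrences:
--             return True
--     return False
-- ===== Notes on version B (the rewrite author's own statement) =====
-- stated objective: alternative
-- what changed: Replaced hash-based counting (Counter then any()-scan) with sort-then-run-length-scan: sort the trace and look for a run of equal adjacent activities longer than the threshold, so no occurrence table exists at all.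
import Mathlib
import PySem

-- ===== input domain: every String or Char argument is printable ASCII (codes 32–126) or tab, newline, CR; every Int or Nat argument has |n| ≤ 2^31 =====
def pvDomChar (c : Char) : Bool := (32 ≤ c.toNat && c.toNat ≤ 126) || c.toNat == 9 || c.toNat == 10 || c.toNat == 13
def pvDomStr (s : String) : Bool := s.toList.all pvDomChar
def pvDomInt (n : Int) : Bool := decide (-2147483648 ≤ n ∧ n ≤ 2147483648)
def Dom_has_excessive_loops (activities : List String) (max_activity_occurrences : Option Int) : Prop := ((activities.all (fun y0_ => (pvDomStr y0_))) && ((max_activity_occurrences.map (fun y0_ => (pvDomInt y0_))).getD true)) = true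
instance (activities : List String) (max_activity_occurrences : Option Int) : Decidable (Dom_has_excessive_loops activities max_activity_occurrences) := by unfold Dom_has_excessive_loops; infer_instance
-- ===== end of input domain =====

-- B replaces A's hash-based Counter-then-scan with sort-then-run-length-scan (alternative algorithm; not faster).


-- ===== PORT A =====
def has_excessive_loops (activities : List String) (max_activity_occurrences : Option Int) : Bool :=
  match max_activity_occurrences with
  | none => false
  | some m =>
    -- (the ValueError branch for m < 1 is excluded by Pre_)
    let counts := PySem.Dict.counter activities
    counts.values.any (fun c => decide (c > m))

-- ===== PORT B =====
-- the run-length scan loop of Source B (state: prev, run)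
def runLoop (m : Int) : Option String → Int → List String → Bool
  | _, _, [] => false
  | prev, run, a :: rest =>
    let run' := if some a == prev then run + 1 else 1
    if run' > m then true else runLoop m (some a) run' rest

def has_excessive_loops_alt (activities : List String) (max_activity_occurrences : Option Int) : Bool :=
  match max_activity_occurrences with
  | none => false
  | some m => runLoop m none 0 (PySem.List.sorted activities (fun x => x) false)

-- ===== PRECONDITION & SPEC =====
-- Pre_ excludes exactly the inputs on which Python A raises ValueError: some m with m < 1.
def Pre_has_excessive_loops (_activities : List String) (max_activity_occurrences : Option Int) : Prop :=
  1 ≤ max_activity_occurrences.getD 1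
instance (activities : List String) (max_activity_occurrences : Option Int) : Decidable (Pre_has_excessive_loops activities max_activity_occurrences) := by unfold Pre_has_excessive_loops; infer_instance

def pvWitness_has_excessive_loops : List String × Option Int := (["a", "b", "a"], some 1)

def Spec_has_excessive_loops (activities : List String) (max_activity_occurrences : Option Int) (out : Bool) : Prop := out = has_excessive_loops_alt activities max_activity_occurrences
instance (activities : List String) (max_activity_occurrences : Option Int) (out : Bool) : Decidable (Spec_has_excessive_loops activities max_activity_occurrences out) := by unfold Spec_has_excessive_loops; infer_instance

-- ===== CLAIM =====
def Claim_equal_has_excessive_loops : Prop := ∀ (activities : List String) (max_activity_occurrences : Option Int), Dom_has_excessive_loops activities max_activity_occurrences → Pre_has_excessive_loops activities max_activity_occurrences → Spec_has_excessive_loops activities max_activity_occurrences (has_excessive_loops activities max_activity_occurrences)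

-- ===== LEMMAS AND PROOFS =====

-- A's Counter-then-scan answers: is there an element whose total count exceeds m?
lemma portA_char (xs : List String) (m : Int) :
    ((PySem.Dict.counter xs).values.any (fun c => decide (c > m)))
      = decide (∃ x ∈ xs, m < (xs.count x : Int)) := by
  rw [PySem.Dict.values_eq_map_keys _ (PySem.Dict.nodup_keys_counter xs) 0]
  rw [List.any_map, Bool.eq_iff_iff]
  simp only [List.any_eq_true, PySem.Dict.getD_counter, PySem.Dict.keys_counter,
    PySem.Set.mem_ofList, Function.comp_apply, decide_eq_true_eq]

-- B's run-length scan over a sorted suffix: with prev = p, running count `run`,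
-- a ≤-sorted suffix all of whose elements are ≥ p, and run still ≤ m, the scan
-- answers: does p's run grow past m, or does some other element occur > m times?
lemma runLoop_char (m : Int) (hm : 1 ≤ m) :
    ∀ (ys : List String) (p : String) (run : Int),
      ys.Pairwise (· ≤ ·) → (∀ x ∈ ys, p ≤ x) → run ≤ m →
      runLoop m (some p) run ys
        = decide ((m < run + (ys.count p : Int)) ∨ ∃ x ∈ ys, x ≠ p ∧ m < (ys.count x : Int)) := by
  intro ys
  induction ys with
  | nil =>
    intro p run _ _ hrun
    simp only [runLoop, List.count_nil, List.not_mem_nil, false_and, exists_false, or_false]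
    rw [eq_comm, decide_eq_false_iff_not]
    push_cast; omega
  | cons a rest ih =>
    intro p run hsort hge hrun
    have hsr : rest.Pairwise (· ≤ ·) := hsort.of_cons
    have har : ∀ x ∈ rest, a ≤ x := fun x hx => (List.pairwise_cons.mp hsort).1 x hx
    have hpa : p ≤ a := hge a List.mem_cons_self
    by_cases hap : a = p
    · subst hap
      simp only [runLoop, beq_self_eq_true, if_pos]
      by_cases hgt : run + 1 > m
      · rw [if_pos hgt, eq_comm, decide_eq_true_iff]
        left
        have : (0 : Int) ≤ ((a :: rest).count a : Int) - 1 := by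
          have := List.count_pos_iff.mpr (List.mem_cons_self (a := a) (l := rest))
          omega
        omega
      · rw [if_neg hgt, ih a (run + 1) hsr har (by omega)]
        congr 1
        apply propext
        have hcnt : ((a :: rest).count a : Int) = (rest.count a : Int) + 1 := by
          rw [List.count_cons_self]; push_cast; ring
        constructor
        · rintro (h | ⟨x, hx, hne, hc⟩)
          · left; omega
          · right
            exact ⟨x, List.mem_cons_of_mem _ hx, hne,
              by rwa [List.count_cons_of_ne (fun h => hne h.symm)]⟩
        · rintro (h | ⟨x, hx, hne, hc⟩)
          · left; omega
          · rcases List.mem_cons.mp hx with h' | h'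
            · exact absurd h' hne
            · right
              exact ⟨x, h', hne,
                by rwa [List.count_cons_of_ne (fun h => hne h.symm)] at hc⟩
    · have hlt : p < a := lt_of_le_of_ne hpa (fun h => hap h.symm)
      have hnp : p ∉ a :: rest := by
        intro hmem
        rcases List.mem_cons.mp hmem with h | h
        · exact absurd h.symm hap
        · exact absurd (har p h) (not_le.mpr hlt)
      have hbeq : (some a == some p) = false := by
        simp [hap]
      simp only [runLoop, hbeq, Bool.false_eq_true, if_false]
      rw [if_neg (by omega : ¬ (1 : Int) > m)]
      rw [ih a 1 hsr har hm]
      congr 1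
      apply propext
      have hcp : ((a :: rest).count p : Int) = 0 := by
        rw [List.count_eq_zero.mpr hnp]; rfl
      have hca : ((a :: rest).count a : Int) = (rest.count a : Int) + 1 := by
        rw [List.count_cons_self]; push_cast; ring
      constructor
      · rintro (h | ⟨x, hx, hne, hc⟩)
        · right
          exact ⟨a, List.mem_cons_self, fun h' => hap h', by omega⟩
        · right
          exact ⟨x, List.mem_cons_of_mem _ hx,
            fun h' => absurd (h' ▸ hx) (fun hm' => hnp (List.mem_cons_of_mem _ hm')),
            by rwa [List.count_cons_of_ne (fun h => hne h.symm)]⟩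
      · rintro (h | ⟨x, hx, _, hc⟩)
        · omega
        · rcases List.mem_cons.mp hx with h' | h'
          · subst h'; left; omega
          · by_cases hxa : x = a
            · subst hxa; left; omega
            · right
              exact ⟨x, h', hxa,
                by rwa [List.count_cons_of_ne (fun h => hxa h.symm)] at hc⟩

-- ===== VERDICT =====
theorem has_excessive_loops_spec : Claim_equal_has_excessive_loops := by
  intro activities mo _ hpre
  unfold Spec_has_excessive_loops has_excessive_loops has_excessive_loops_alt
  match mo with
  | none => rfl
  | some m =>
    simp only
    have hm : 1 ≤ m := by simpa [Pre_has_excessive_loops] using hpre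
    rw [portA_char]
    have hperm := PySem.List.sorted_perm activities (fun x => x) false
    have hcount : ∀ x, ((PySem.List.sorted activities (fun x => x) false).count x) = activities.count x :=
      fun x => hperm.count_eq x
    have hmem : ∀ x, x ∈ PySem.List.sorted activities (fun x => x) false ↔ x ∈ activities :=
      fun x => hperm.mem_iff
    have hpw : (PySem.List.sorted activities (fun x => x) false).Pairwise (· ≤ ·) := by
      have := PySem.List.sorted_pairwise activities (fun x => x)
      simpa using this
    rw [show decide (∃ x ∈ activities, m < (activities.count x : Int))
          = decide (∃ x ∈ PySem.List.sorted activities (fun x => x) false,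
              m < ((PySem.List.sorted activities (fun x => x) false).count x : Int)) from by
      congr 1; apply propext
      constructor
      · rintro ⟨x, hx, hc⟩; exact ⟨x, (hmem x).mpr hx, by rw [hcount]; exact hc⟩
      · rintro ⟨x, hx, hc⟩; exact ⟨x, (hmem x).mp hx, by rw [hcount] at hc; exact hc⟩]
    cases hs : PySem.List.sorted activities (fun x => x) false with
    | nil =>
      simp [runLoop]
    | cons a t =>
      rw [hs] at hpw
      have hge : ∀ x ∈ t, a ≤ x := fun x hx => (List.pairwise_cons.mp hpw).1 x hx
      have hstep : runLoop m none 0 (a :: t) = if (1 : Int) > m then true else runLoop m (some a) 1 t := by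
        simp [runLoop]
      rw [hstep, if_neg (by omega : ¬ (1 : Int) > m),
        runLoop_char m hm t a 1 hpw.of_cons hge hm]
      congr 1
      apply propext
      have hca : ((a :: t).count a : Int) = (t.count a : Int) + 1 := by
        rw [List.count_cons_self]; push_cast; ring
      constructor
      · rintro ⟨x, hx, hc⟩
        by_cases hxa : x = a
        · subst hxa; left; omega
        · rcases List.mem_cons.mp hx with h' | h'
          · exact absurd h' hxa
          · right
            exact ⟨x, h', hxa,
              by rwa [List.count_cons_of_ne (fun h => hxa h.symm)] at hc⟩
      · rintro (h | ⟨x, hx, hne, hc⟩)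
        · exact ⟨a, List.mem_cons_self, by omega⟩
        · exact ⟨x, List.mem_cons_of_mem _ hx,
            by rwa [List.count_cons_of_ne (fun h => hne h.symm)]⟩
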